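-- pv_equiv track=rewrite | github.com/otaniyoz/bits-and-bobs | hw0.py | matrix_identity
-- ===== SOURCE A (Python) =====
-- def matrix_identity(n, a=1):
--   I = []
--   for i in range(n):
--     row = []
--     for j in range(n):
--       if i == j: row.append(1*a)
--       else: row.append(0)
--     I.append(row)
--   return I
-- ===== SOURCE B (Python) =====
-- def matrix_identity(n, a=1):
--     if n <= 0:
--         return []
--     flat = [a if k % (n + 1) == 0 else 0 for k in range(n * n)]
--     return [flat[i * n:(i + 1) * n] for i in range(n)]
-- ===== Notes on version B (the rewrite author's own statement) =====
-- stated objective: alternative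
-- what changed: Builds the n*n matrix as one flat list where the diagonal positions are exactly the multiples of n+1 (k % (n+1) == 0), then chunks the flat list into rows by slicing, instead of A's nested row/column loops with an i==j test.
import Mathlib
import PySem

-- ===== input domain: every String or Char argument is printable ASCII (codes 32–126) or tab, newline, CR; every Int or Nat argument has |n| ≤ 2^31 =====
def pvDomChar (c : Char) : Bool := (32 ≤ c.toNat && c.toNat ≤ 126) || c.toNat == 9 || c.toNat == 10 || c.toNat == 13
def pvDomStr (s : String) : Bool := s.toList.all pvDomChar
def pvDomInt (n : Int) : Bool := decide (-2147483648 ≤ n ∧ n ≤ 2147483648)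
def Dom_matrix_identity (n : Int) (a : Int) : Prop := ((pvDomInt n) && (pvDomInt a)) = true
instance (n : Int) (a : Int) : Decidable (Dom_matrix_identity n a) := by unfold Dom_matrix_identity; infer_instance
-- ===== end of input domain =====

-- B builds the n*n matrix as one flat list whose diagonal positions are the multiples of n+1
-- (k % (n+1) == 0) and chunks it into rows by slicing; an alternative to A's nested loops, same cost.

-- ===== PORT A =====
def matrix_identity (n : Int) (a : Int) : List (List Int) :=
  (PySem.List.pyRange 0 n 1).foldl (fun I i =>
    I ++ [(PySem.List.pyRange 0 n 1).foldl (fun row j =>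
      row ++ [if i = j then 1 * a else 0]) []]) []

-- ===== PORT B =====
def matrix_identity_alt (n : Int) (a : Int) : List (List Int) :=
  if n ≤ 0 then []
  else
    let flat := (PySem.List.pyRange 0 (n * n) 1).map
      (fun k => if PySem.Int.mod k (n + 1) = 0 then a else 0)
    (PySem.List.pyRange 0 n 1).map
      (fun i => PySem.List.slice flat (some (i * n)) (some ((i + 1) * n)))

-- ===== PRECONDITION & SPEC =====
def Spec_matrix_identity (n : Int) (a : Int) (out : List (List Int)) : Prop := out = matrix_identity_alt n a
instance (n : Int) (a : Int) (out : List (List Int)) : Decidable (Spec_matrix_identity n a out) := by unfold Spec_matrix_identity; infer_instance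

-- ===== CLAIM (what is proved, stated in full; the proofs are below) =====
def Claim_equal_matrix_identity : Prop := ∀ (n : Int) (a : Int), Dom_matrix_identity n a → Spec_matrix_identity n a (matrix_identity n a)

-- ===== LEMMAS AND PROOFS =====

-- canonical form both sides are reduced to
def canonRow (N : Nat) (a : Int) (i : Nat) : List Int :=
  (List.range N).map (fun j => if i = j then a else 0)

def canon (N : Nat) (a : Int) : List (List Int) :=
  (List.range N).map (canonRow N a)

-- 'for x in xs: acc.append(f x)' is 'init ++ xs.map f'
theorem foldl_push {α β : Type} (f : α → β) (xs : List α) (init : List β) :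
    xs.foldl (fun acc x => acc ++ [f x]) init = init ++ xs.map f := by
  induction xs generalizing init with
  | nil => simp
  | cons y ys ih => simp [List.foldl_cons, ih]

theorem pyRange_zero_natCast' (N : Nat) :
    PySem.List.pyRange 0 (N : Int) 1 = List.map (fun k : Nat => (k : Int)) (List.range N) := by
  rw [PySem.List.pyRange_one]
  have h : (((N : Int)) - 0).toNat = N := by omega
  rw [h]
  apply List.map_congr_left
  intro k _
  omega

-- divisibility characterisation of the diagonal of the flattened matrix
theorem diag_mod (N i t : Nat) (hi : i < N) (ht : t < N) :
    (((N : Int) + 1) ∣ ((i * N + t : Nat) : Int)) ↔ t = i := by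
  have hrw : ((i * N + t : Nat) : Int) = ((N : Int) + 1) * (i : Int) + ((t : Int) - i) := by
    push_cast; ring
  rw [hrw]
  constructor
  · intro h
    have hd : ((N : Int) + 1) ∣ ((t : Int) - i) :=
      (dvd_add_right (Dvd.intro _ rfl)).mp h
    by_contra hne
    have habs : ((N : Int) + 1) ∣ |(t : Int) - i| := (dvd_abs _ _).mpr hd
    have hpos : 0 < |(t : Int) - i| := by
      rw [abs_pos]; intro h0; apply hne; omega
    have hle := Int.le_of_dvd hpos habs
    have hb : |(t : Int) - i| ≤ (N : Int) - 1 := by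
      rw [abs_le]; constructor <;> omega
    omega
  · intro h
    rw [h]
    exact ⟨i, by ring⟩

-- A equals the canonical matrix
theorem A_eq_canon (N : Nat) (a : Int) :
    matrix_identity (N : Int) a = canon N a := by
  unfold matrix_identity canon
  rw [foldl_push, List.nil_append, pyRange_zero_natCast', List.map_map]
  apply List.map_congr_left
  intro i _
  simp only [Function.comp]
  rw [foldl_push, List.nil_append, List.map_map]
  unfold canonRow
  apply List.map_congr_left
  intro j _
  simp only [Function.comp, one_mul]
  rcases eq_or_ne i j with h | h
  · subst h; simp
  · rw [if_neg (fun hc => h (by exact_mod_cast hc)), if_neg h]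

-- B equals the canonical matrix (for 0 < N)
theorem B_eq_canon (N : Nat) (a : Int) (hNpos : 0 < N) :
    matrix_identity_alt (N : Int) a = canon N a := by
  unfold matrix_identity_alt canon
  rw [if_neg (by exact_mod_cast Nat.not_succ_le_zero (N - 1) ∘ fun h => by omega)]
  have hflat : (PySem.List.pyRange 0 ((N : Int) * N) 1).map
      (fun k => if PySem.Int.mod k ((N : Int) + 1) = 0 then a else 0)
      = List.map (fun k : Nat => if ((N : Int) + 1) ∣ ((k : Int)) then a else 0) (List.range (N * N)) := by
    have hnn : (N : Int) * N = ((N * N : Nat) : Int) := by push_cast; ring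
    rw [hnn, pyRange_zero_natCast', List.map_map]
    apply List.map_congr_left
    intro k _
    simp only [Function.comp, PySem.Int.mod_eq_zero_iff_dvd]
  rw [hflat, pyRange_zero_natCast', List.map_map]
  apply List.map_congr_left
  intro i hi
  rw [List.mem_range] at hi
  simp only [Function.comp]
  have h1 : (i : Int) * (N : Int) = ((i * N : Nat) : Int) := by push_cast; ring
  have h2 : ((i : Int) + 1) * (N : Int) = ((i * N : Nat) : Int) + ((N : Nat) : Int) := by
    push_cast; ring
  rw [h1, h2, PySem.List.slice_natCast_add]
  unfold canonRow
  have hlen : (List.map (fun k : Nat => if ((N : Int) + 1) ∣ ((k : Int)) then a else 0)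
      (List.range (N * N))).length = N * N := by simp
  apply List.ext_getElem
  · simp only [List.length_take, List.length_drop, hlen, List.length_map, List.length_range]
    have : i * N + N ≤ N * N := by nlinarith
    omega
  · intro t ht1 ht2
    have htN : t < N := by
      simp only [List.length_take, List.length_drop, hlen] at ht1
      omega
    have hidx : i * N + t < N * N := by nlinarith
    rw [List.getElem_take, List.getElem_drop]
    simp only [List.getElem_map, List.getElem_range]
    simp only [diag_mod N i t hi htN]
    rcases eq_or_ne i t with h | h
    · subst h; simp
    · rw [if_neg (fun hc => h hc.symm), if_neg h]

-- ===== VERDICT (by name: the statement is the Claim_ definition above) =====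
theorem matrix_identity_spec : Claim_equal_matrix_identity := by
  intro n a _
  unfold Spec_matrix_identity
  by_cases hn : n ≤ 0
  · have hr : PySem.List.pyRange 0 n 1 = [] := by
      rw [PySem.List.pyRange_one]
      have h0 : (n - 0).toNat = 0 := by omega
      rw [h0]; simp
    have hA : matrix_identity n a = [] := by
      unfold matrix_identity; rw [hr]; rfl
    have hB : matrix_identity_alt n a = [] := by
      unfold matrix_identity_alt; rw [if_pos hn]
    rw [hA, hB]
  · have hn' : 0 < n := by omega
    obtain ⟨N, rfl⟩ : ∃ N : Nat, n = (N : Int) := ⟨n.toNat, (Int.toNat_of_nonneg (le_of_lt hn')).symm⟩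
    have hNpos : 0 < N := by exact_mod_cast hn'
    rw [A_eq_canon N a, B_eq_canon N a hNpos]
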